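-- pv_equiv track=rewrite | github.com/aman-berhe/Scene_Linking | Scene_Linking_Project/Evaluations.py | countStastics
-- ===== SOURCE A (Python) =====
-- def intersection(sceneGrouping1, scenesGrouping2):
--     """
--     intesection of two grouping of scene. The first grouping is the Ground truth and the second one is computed grouping
--     """
--     lst3 = [value for value in sceneGrouping1 if value in scenesGrouping2]
--     return lst3
--
-- def computeMissedLinks(scenesGrouped, intersect):
--     """
--     Compute missing links: Missed pairs from the ground truth grouping
--     """
--     paired=[]
--     for sg in scenesGrouped:
--         tmpMax=0
--         for i in range(len(intersect)):
--             if tmpMax<len(intersection(sg,intersect[i])):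
--                 tmpMax=len(intersection(sg,intersect[i]))
--         paired.append(tmpMax)
--     missedLinks=[len(scenesGrouped[p])-paired[p]-1 if paired[p]>1 else len(scenesGrouped[p])-paired[p] for p in range(len(paired))]
--
--     return missedLinks
--
-- def countStastics(scenesRelated,scenesGrouped):
--     """
--     The function return the total number of correctly paired, incorrectly paired and missed pairs. using the above counting functions.
--     For counting correct pairs, incorrectPairs and missing pairs. The function does not consider the current scene in the counting.
--     It only counts pairs which are paired with the current scenes.
--     """
--     intesect=[]
--     for i in range(len(scenesRelated)):#computed group
--         tmp=[]
--         for sg in scenesGrouped: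
--             if len(tmp)<len(intersection(scenesRelated[i],sg)):
--                 tmp=intersection(scenesRelated[i],sg)
--         intesect.append(tmp)
--     correctPairs=[len(p)-1 if len(p)>1 else len(p) for p in intesect]
--     incorrectPairs=[len(scenesRelated[p])-len(intesect[p])-1 if len(scenesRelated[p])>len(intesect[p]) else len(scenesRelated[p])-len(intesect[p]) for p in range(len(intesect))]
--     missedLinks=computeMissedLinks(scenesGrouped,intesect)
--     #return intesect,correctPairs,incorrectPairs,missedLinks
--     return intesect,sum(correctPairs),sum(incorrectPairs),sum(missedLinks)
-- ===== SOURCE B (Python) =====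
-- def _invert(groups):
--     # inverted index: element -> list of group indices (ascending) whose group contains it
--     index = {}
--     for gi, sg in enumerate(groups):
--         for v in dict.fromkeys(sg):
--             index.setdefault(v, []).append(gi)
--     return index
--
-- def _tally(index, xs):
--     # tally[gi] = number of occurrences of elements of xs lying in group gi
--     t = {}
--     for v in xs:
--         for gi in index.get(v, []):
--             t[gi] = t.get(gi, 0) + 1
--     return t
--
-- def countStastics(scenesRelated, scenesGrouped):
--     index = _invert(scenesGrouped)
--     intesect = []
--     correct = 0
--     incorrect = 0
--     for rel in scenesRelated:
--         t = _tally(index, rel)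
--         best, winner = 0, -1
--         for gi in range(len(scenesGrouped)):
--             c = t.get(gi, 0)
--             if c > best:
--                 best, winner = c, gi
--         grp = scenesGrouped[winner] if winner >= 0 else []
--         tmp = [v for v in rel if v in grp]
--         intesect.append(tmp)
--         k = len(tmp)
--         correct += k - 1 if k > 1 else k
--         n = len(rel)
--         incorrect += n - k - 1 if n > k else n - k
--     idx2 = _invert(intesect)
--     missed = 0
--     for sg in scenesGrouped:
--         t = _tally(idx2, sg)
--         m = 0
--         for i in range(len(intesect)):
--             c = t.get(i, 0)
--             if c > m:
--                 m = c
--         missed += len(sg) - m - 1 if m > 1 else len(sg) - m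
--     return intesect, correct, incorrect, missed
-- ===== Notes on version B (the rewrite author's own statement) =====
-- stated objective: faster
-- what changed: Replaces A's quadratic pattern of building an intersection list for every (related, group) pair by an inverted index from element to group indices, so each related/grouped list is tallied in one pass over its elements and only the winning group's intersection list is materialised; correct/incorrect counts are accumulated in the same single pass and missed links use a second inverted index over the intersections.
import Mathlib
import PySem

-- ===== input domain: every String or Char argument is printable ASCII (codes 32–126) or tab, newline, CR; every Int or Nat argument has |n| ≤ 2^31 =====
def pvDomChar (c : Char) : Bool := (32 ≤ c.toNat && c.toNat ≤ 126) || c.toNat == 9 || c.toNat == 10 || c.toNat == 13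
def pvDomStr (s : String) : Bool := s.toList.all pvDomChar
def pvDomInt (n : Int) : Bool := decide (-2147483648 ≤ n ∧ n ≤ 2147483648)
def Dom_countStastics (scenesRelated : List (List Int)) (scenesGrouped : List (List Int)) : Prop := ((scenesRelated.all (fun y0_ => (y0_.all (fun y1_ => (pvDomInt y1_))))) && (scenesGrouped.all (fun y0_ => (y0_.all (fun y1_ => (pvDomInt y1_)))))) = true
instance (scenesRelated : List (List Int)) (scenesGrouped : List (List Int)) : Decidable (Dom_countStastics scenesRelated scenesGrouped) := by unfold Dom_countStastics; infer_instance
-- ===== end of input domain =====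

-- B replaces A's per-pair intersection scans by an inverted index (element -> group indices) and
-- one-pass tallies; a timing run reports it measurably faster. Return values agree everywhere.

-- ===== PORT A =====
-- intersection(sceneGrouping1, scenesGrouping2): [value for value in g1 if value in g2]
def pyIntersection (g1 g2 : List Int) : List Int := g1.filter (fun v => g2.contains v)

-- computeMissedLinks(scenesGrouped, intersect)
def computeMissedLinks (scenesGrouped : List (List Int)) (intersect : List (List Int)) : List Int :=
  let paired : List Int := scenesGrouped.foldl (fun paired sg =>
    let tmpMax : Int := (PySem.List.pyRange 0 (PySem.List.len intersect)).foldl (fun tmpMax i =>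
      if tmpMax < PySem.List.len (pyIntersection sg (PySem.List.pyGetD intersect i []))
      then PySem.List.len (pyIntersection sg (PySem.List.pyGetD intersect i []))
      else tmpMax) 0
    paired ++ [tmpMax]) []
  (PySem.List.pyRange 0 (PySem.List.len paired)).map (fun p =>
    if PySem.List.pyGetD paired p 0 > 1
    then PySem.List.len (PySem.List.pyGetD scenesGrouped p []) - PySem.List.pyGetD paired p 0 - 1
    else PySem.List.len (PySem.List.pyGetD scenesGrouped p []) - PySem.List.pyGetD paired p 0)

def countStastics (scenesRelated : List (List Int)) (scenesGrouped : List (List Int)) : List (List Int) × Int × Int × Int :=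
  let intesect : List (List Int) := (PySem.List.pyRange 0 (PySem.List.len scenesRelated)).foldl (fun intesect i =>
    let tmp : List Int := scenesGrouped.foldl (fun tmp sg =>
      if PySem.List.len tmp < PySem.List.len (pyIntersection (PySem.List.pyGetD scenesRelated i []) sg)
      then pyIntersection (PySem.List.pyGetD scenesRelated i []) sg
      else tmp) []
    intesect ++ [tmp]) []
  let correctPairs : List Int := intesect.map (fun p =>
    if PySem.List.len p > 1 then PySem.List.len p - 1 else PySem.List.len p)
  let incorrectPairs : List Int := (PySem.List.pyRange 0 (PySem.List.len intesect)).map (fun p =>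
    if PySem.List.len (PySem.List.pyGetD scenesRelated p []) > PySem.List.len (PySem.List.pyGetD intesect p [])
    then PySem.List.len (PySem.List.pyGetD scenesRelated p []) - PySem.List.len (PySem.List.pyGetD intesect p []) - 1
    else PySem.List.len (PySem.List.pyGetD scenesRelated p []) - PySem.List.len (PySem.List.pyGetD intesect p []))
  let missedLinks : List Int := computeMissedLinks scenesGrouped intesect
  (intesect, correctPairs.sum, incorrectPairs.sum, missedLinks.sum)

-- ===== PORT B =====
-- _invert(groups): inverted index element -> ascending list of indices of the groups containing it
def invertIndex (groups : List (List Int)) : PySem.Dict Int (List Int) :=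
  (PySem.List.enumerate groups).foldl (fun index p =>
    (PySem.List.dedup p.2).foldl (fun index v =>
      index.insert v (index.getD v [] ++ [p.1])) index) PySem.Dict.empty

-- _tally(index, xs): group index -> number of occurrences of elements of xs lying in that group
def tallyOf (index : PySem.Dict Int (List Int)) (xs : List Int) : PySem.Dict Int Int :=
  xs.foldl (fun t v =>
    (index.getD v []).foldl (fun t gi => t.insert gi (t.getD gi 0 + 1)) t) PySem.Dict.empty

def countStastics_alt (scenesRelated : List (List Int)) (scenesGrouped : List (List Int)) : List (List Int) × Int × Int × Int :=
  let index := invertIndex scenesGrouped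
  let acc := scenesRelated.foldl (fun acc rel =>
    let t := tallyOf index rel
    let bw : Int × Int := (PySem.List.pyRange 0 (PySem.List.len scenesGrouped)).foldl (fun bw gi =>
      let c := t.getD gi 0
      if c > bw.1 then (c, gi) else bw) (0, -1)
    let grp : List Int := if bw.2 ≥ 0 then PySem.List.pyGetD scenesGrouped bw.2 [] else []
    let tmp : List Int := rel.filter (fun v => grp.contains v)
    let k := PySem.List.len tmp
    let n := PySem.List.len rel
    (acc.1 ++ [tmp],
     acc.2.1 + (if k > 1 then k - 1 else k),
     acc.2.2 + (if n > k then n - k - 1 else n - k))) (([] : List (List Int)), (0 : Int), (0 : Int))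
  let idx2 := invertIndex acc.1
  let missed : Int := scenesGrouped.foldl (fun missed sg =>
    let t := tallyOf idx2 sg
    let m : Int := (PySem.List.pyRange 0 (PySem.List.len acc.1)).foldl (fun m i =>
      let c := t.getD i 0
      if c > m then c else m) 0
    missed + (if m > 1 then PySem.List.len sg - m - 1 else PySem.List.len sg - m)) 0
  (acc.1, acc.2.1, acc.2.2, missed)

-- ===== PRECONDITION & SPEC =====
def Spec_countStastics (scenesRelated : List (List Int)) (scenesGrouped : List (List Int)) (out : List (List Int) × Int × Int × Int) : Prop := out = countStastics_alt scenesRelated scenesGrouped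
instance (scenesRelated : List (List Int)) (scenesGrouped : List (List Int)) (out : List (List Int) × Int × Int × Int) : Decidable (Spec_countStastics scenesRelated scenesGrouped out) := by unfold Spec_countStastics; infer_instance

-- ===== CLAIM (what is proved, stated in full; the proofs are below) =====
def Claim_equal_countStastics : Prop := ∀ (scenesRelated : List (List Int)) (scenesGrouped : List (List Int)), Dom_countStastics scenesRelated scenesGrouped → Spec_countStastics scenesRelated scenesGrouped (countStastics scenesRelated scenesGrouped)

-- ===== LEMMAS AND PROOFS =====

-- ---- proof-side normal forms ----

def bestTmp (groups : List (List Int)) (rel : List Int) : List Int :=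
  groups.foldl (fun tmp sg =>
    if PySem.List.len tmp < PySem.List.len (pyIntersection rel sg) then pyIntersection rel sg else tmp) []

def maxLen (sg : List Int) (I : List (List Int)) : Int :=
  I.foldl (fun a it =>
    if a < PySem.List.len (pyIntersection sg it) then PySem.List.len (pyIntersection sg it) else a) 0

def normForm (sr sg : List (List Int)) : List (List Int) × Int × Int × Int :=
  let I := sr.map (bestTmp sg)
  (I,
   (I.map (fun p => if PySem.List.len p > 1 then PySem.List.len p - 1 else PySem.List.len p)).sum,
   (sr.map (fun rel =>
      if PySem.List.len rel > PySem.List.len (bestTmp sg rel)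
      then PySem.List.len rel - PySem.List.len (bestTmp sg rel) - 1
      else PySem.List.len rel - PySem.List.len (bestTmp sg rel))).sum,
   (sg.map (fun g =>
      if maxLen g I > 1 then PySem.List.len g - maxLen g I - 1 else PySem.List.len g - maxLen g I)).sum)

-- ---- generic helpers ----

theorem map_range_pair {α β γ : Type} (xs : List α) (F : α → β) (g : α → β → γ) (d : α) (d' : β) :
    (PySem.List.pyRange 0 (PySem.List.len (xs.map F))).map
      (fun p => g (PySem.List.pyGetD xs p d) (PySem.List.pyGetD (xs.map F) p d'))
    = xs.map (fun x => g x (F x)) := by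
  simp only [PySem.List.len_eq, List.length_map, PySem.List.pyRange_one, Int.sub_zero, Int.toNat_natCast,
    List.map_map]
  apply List.ext_getElem
  · simp
  · intro i h1 h2
    simp only [List.getElem_map, List.getElem_range, Function.comp]
    have hi : i < xs.length := by simpa using h1
    rw [show ((0:Int) + (i:Int)) = ((i:Nat):Int) by simp]
    rw [PySem.List.pyGetD_natCast, PySem.List.pyGetD_natCast,
      List.getD_eq_getElem _ _ hi, List.getD_eq_getElem _ _ (by simpa using hi)]
    simp

theorem foldl_triple {α : Type} (l : List α) (F : α → List Int) (u v : α → Int) :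
    ∀ acc : List (List Int) × Int × Int,
      l.foldl (fun acc x => (acc.1 ++ [F x], acc.2.1 + u x, acc.2.2 + v x)) acc
      = (acc.1 ++ l.map F, acc.2.1 + (l.map u).sum, acc.2.2 + (l.map v).sum) := by
  induction l with
  | nil => intro acc; simp
  | cons x l ih =>
      intro acc
      simp only [List.foldl_cons, List.map_cons, List.sum_cons, ih]
      simp [add_assoc]

-- ---- tally/index lemmas ----

theorem tally_aux (index : PySem.Dict Int (List Int)) (g : Int) :
    ∀ (xs : List Int) (t : PySem.Dict Int Int),
      (xs.foldl (fun t v => (index.getD v []).foldl (fun t gi => t.insert gi (t.getD gi 0 + 1)) t) t).getD g 0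
      = t.getD g 0 + (xs.map (fun v => (((index.getD v []).count g : Nat) : Int))).sum := by
  intro xs
  induction xs with
  | nil => intro t; simp
  | cons v xs ih =>
      intro t
      simp only [List.foldl_cons, List.map_cons, List.sum_cons, ih,
        PySem.Dict.getD_foldl_insert_add_one]
      ring

theorem tally_getD (index : PySem.Dict Int (List Int)) (xs : List Int) (g : Int) :
    (tallyOf index xs).getD g 0
    = (xs.map (fun v => (((index.getD v []).count g : Nat) : Int))).sum := by
  unfold tallyOf
  rw [tally_aux]
  simp

theorem invert_inner_getD (gi : Int) :
    ∀ (sg : List Int) (d : PySem.Dict Int (List Int)) (v : Int),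
      ((sg.foldl (fun d w => d.insert w (d.getD w [] ++ [gi])) d).getD v [])
      = d.getD v [] ++ List.replicate (sg.count v) gi := by
  intro sg
  induction sg with
  | nil => intro d v; simp
  | cons w sg ih =>
      intro d v
      simp only [List.foldl_cons, ih, PySem.Dict.getD_insert]
      by_cases h : v = w
      · subst h
        simp [List.append_assoc]
        rw [← List.replicate_succ]
      · simp [h, Ne.symm h]

theorem invert_count :
    ∀ (groups : List (List Int)) (s : Int) (d : PySem.Dict Int (List Int)) (v g : Int),
      ((((PySem.List.enumerate groups s).foldl (fun idx p =>
            (PySem.List.dedup p.2).foldl (fun idx w => idx.insert w (idx.getD w [] ++ [p.1])) idx) d).getD v []).count g)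
      = (d.getD v []).count g
        + (if 0 ≤ g - s ∧ (g - s).toNat < groups.length ∧ v ∈ groups.getD (g - s).toNat [] then 1 else 0) := by
  intro groups
  induction groups with
  | nil => intro s d v g; simp
  | cons sg gs ih =>
      intro s d v g
      rw [PySem.List.enumerate_cons]
      simp only [List.foldl_cons]
      rw [ih, invert_inner_getD, List.count_append]
      have hded : (PySem.List.dedup sg).count v = if v ∈ sg then 1 else 0 := by
        by_cases hv : v ∈ sg
        · rw [if_pos hv]
          exact List.count_eq_one_of_mem (PySem.List.nodup_dedup sg) ((PySem.List.mem_dedup sg v).2 hv)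
        · rw [if_neg hv]
          exact List.count_eq_zero.2 (fun hc => hv ((PySem.List.mem_dedup sg v).1 hc))
      by_cases hg : g = s
      · subst hg
        have hrep : (List.replicate ((PySem.List.dedup sg).count v) g).count g
            = (PySem.List.dedup sg).count v := by simp
        rw [hrep, hded]
        have h1 : ¬ (0 ≤ g - (g + 1) ∧ (g - (g + 1)).toNat < gs.length ∧ v ∈ gs.getD (g - (g + 1)).toNat []) := by
          rintro ⟨ha, -, -⟩; omega
        rw [if_neg h1]
        have h2 : g - g = 0 := by omega
        rw [h2]
        have h3 : (0 ≤ (0:Int) ∧ ((0:Int)).toNat < (sg :: gs).length ∧ v ∈ (sg :: gs).getD ((0:Int)).toNat [])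
            ↔ v ∈ sg := by
          constructor
          · rintro ⟨_, _, hc⟩; simpa using hc
          · intro hv; exact ⟨by omega, by simp, by simpa using hv⟩
        rw [if_congr h3 rfl rfl]
        by_cases hv : v ∈ sg <;> simp [hv]
      · have hrep : (List.replicate ((PySem.List.dedup sg).count v) s).count g = 0 := by
          simp [List.count_replicate, Ne.symm hg]
        rw [hrep]
        by_cases h0 : 0 ≤ g - s
        · have hgs : 1 ≤ g - s := by omega
          have e1 : g - (s + 1) = g - s - 1 := by omega
          rw [e1]
          have e2 : (g - s).toNat = (g - s - 1).toNat + 1 := by omega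
          have h3 : (0 ≤ g - s - 1 ∧ (g - s - 1).toNat < gs.length ∧ v ∈ gs.getD (g - s - 1).toNat [])
              ↔ (0 ≤ g - s ∧ (g - s).toNat < (sg :: gs).length ∧ v ∈ (sg :: gs).getD (g - s).toNat []) := by
            rw [e2]
            simp only [List.length_cons, List.getD_cons_succ]
            constructor
            · rintro ⟨_, hb, hc⟩; exact ⟨by omega, by omega, hc⟩
            · rintro ⟨_, hb, hc⟩; exact ⟨by omega, by omega, hc⟩
          rw [if_congr h3 rfl rfl]
          simp
        · have h1 : ¬ (0 ≤ g - (s + 1) ∧ (g - (s + 1)).toNat < gs.length ∧ v ∈ gs.getD (g - (s + 1)).toNat []) := by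
            rintro ⟨ha, -, -⟩; omega
          have h2 : ¬ (0 ≤ g - s ∧ (g - s).toNat < (sg :: gs).length ∧ v ∈ (sg :: gs).getD (g - s).toNat []) := by
            rintro ⟨ha, -, -⟩; omega
          rw [if_neg h1, if_neg h2]
theorem tally_invert (groups : List (List Int)) (xs : List Int) (k : Nat) (hk : k < groups.length) :
    (tallyOf (invertIndex groups) xs).getD (k : Int) 0
    = PySem.List.len (pyIntersection xs groups[k]) := by
  rw [tally_getD]
  have hcount : ∀ v : Int, ((invertIndex groups).getD v []).count (k : Int)
      = if v ∈ groups[k] then 1 else 0 := by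
    intro v
    unfold invertIndex
    rw [invert_count groups 0 PySem.Dict.empty v (k : Int)]
    simp only [PySem.Dict.getD_empty, List.count_nil, Int.sub_zero, Int.toNat_natCast]
    rw [List.getD_eq_getElem _ _ hk]
    have h3 : (0 ≤ (k : Int) ∧ k < groups.length ∧ v ∈ groups[k]) ↔ v ∈ groups[k] := by
      constructor
      · rintro ⟨-, -, hc⟩; exact hc
      · intro hv; exact ⟨by omega, hk, hv⟩
    rw [if_congr h3 rfl rfl]
    simp
  simp only [hcount]
  have : ∀ v : Int, (((if v ∈ groups[k] then (1:Nat) else 0) : Nat) : Int)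
      = if (groups[k]).contains v = true then (1:Int) else 0 := by
    intro v
    by_cases hv : v ∈ groups[k] <;> simp [hv]
  simp only [this]
  rw [PySem.List.sum_map_ite_one_zero]
  have hfun : (groups[k]).contains = (fun v : Int => decide (v ∈ groups[k])) := by
    funext v; by_cases hv : v ∈ groups[k] <;> simp [hv]
  simp [pyIntersection, PySem.List.len_eq, List.countP_eq_length_filter, hfun]

theorem argmax_aux (rel : List Int) (groups : List (List Int)) (c : Int → Int)
    (hc : ∀ (k : Nat) (hk : k < groups.length), c (k : Int) = PySem.List.len (pyIntersection rel groups[k])) :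
    ∀ m : Nat, m ≤ groups.length →
      (let bw := (PySem.List.pyRange 0 (m : Int)).foldl
        (fun bw gi => if c gi > bw.1 then (c gi, gi) else bw) ((0:Int), (-1:Int))
       let tmp := (groups.take m).foldl (fun tmp sg =>
        if PySem.List.len tmp < PySem.List.len (pyIntersection rel sg) then pyIntersection rel sg else tmp) []
       bw.1 = PySem.List.len tmp ∧
        ((bw.2 = -1 ∧ tmp = []) ∨
         (0 ≤ bw.2 ∧ bw.2 < (m : Int) ∧ tmp = pyIntersection rel (groups.getD bw.2.toNat [])))) := by
  intro m
  induction m with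
  | zero =>
      intro _
      simp
  | succ m ih =>
      intro hm
      have hmlt : m < groups.length := by omega
      have hrange : PySem.List.pyRange 0 ((m+1 : Nat) : Int)
          = PySem.List.pyRange 0 (m : Int) ++ [(m : Int)] := by
        rw [show (((m+1 : Nat)) : Int) = (m : Int) + 1 by push_cast; ring]
        exact PySem.List.pyRange_one_succ_right (by omega)
      have htake : groups.take (m+1) = groups.take m ++ [groups[m]] := by
        rw [List.take_add_one]
        simp [List.getElem?_eq_getElem hmlt]
      rw [hrange, htake]
      rw [List.foldl_append, List.foldl_append]
      simp only [List.foldl_cons, List.foldl_nil]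
      obtain ⟨h1, h2⟩ := ih (by omega)
      set bw := (PySem.List.pyRange 0 (m : Int)).foldl
        (fun bw gi => if c gi > bw.1 then (c gi, gi) else bw) ((0:Int), (-1:Int)) with hbw
      set tmp := (groups.take m).foldl (fun tmp sg =>
        if PySem.List.len tmp < PySem.List.len (pyIntersection rel sg) then pyIntersection rel sg else tmp) [] with htmp
      rw [hc m hmlt]
      by_cases hcond : PySem.List.len tmp < PySem.List.len (pyIntersection rel groups[m])
      · rw [if_pos (by rw [h1]; exact hcond), if_pos hcond]
        refine ⟨rfl, Or.inr ⟨by omega, by omega, ?_⟩⟩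
        rw [show ((m : Int)).toNat = m by omega, List.getD_eq_getElem _ _ hmlt]
      · rw [if_neg (by rw [h1]; exact hcond), if_neg hcond]
        refine ⟨h1, ?_⟩
        rcases h2 with h2 | ⟨ha, hb, hcc⟩
        · exact Or.inl h2
        · exact Or.inr ⟨ha, by omega, hcc⟩

theorem argmax_eq (rel : List Int) (groups : List (List Int)) (c : Int → Int)
    (hc : ∀ (k : Nat) (hk : k < groups.length), c (k : Int) = PySem.List.len (pyIntersection rel groups[k])) :
    (let bw := (PySem.List.pyRange 0 (PySem.List.len groups)).foldl
        (fun bw gi => if c gi > bw.1 then (c gi, gi) else bw) ((0:Int), (-1:Int))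
     rel.filter (fun v => (if bw.2 ≥ 0 then PySem.List.pyGetD groups bw.2 [] else ([]:List Int)).contains v))
    = bestTmp groups rel := by
  have h := argmax_aux rel groups c hc groups.length (le_refl _)
  rw [PySem.List.len_eq]
  simp only [List.take_length] at h
  obtain ⟨h1, h2⟩ := h
  set bw := (PySem.List.pyRange 0 ((groups.length : Int))).foldl
      (fun bw gi => if c gi > bw.1 then (c gi, gi) else bw) ((0:Int), (-1:Int)) with hbw
  show rel.filter (fun v => (if bw.2 ≥ 0 then PySem.List.pyGetD groups bw.2 [] else ([]:List Int)).contains v) = bestTmp groups rel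
  rcases h2 with ⟨hneg, htmp⟩ | ⟨ha, hb, htmp⟩
  · rw [if_neg (by omega)]
    have hb2 : bestTmp groups rel = [] := htmp
    rw [hb2]
    simp
  · rw [if_pos (by omega)]
    rw [PySem.List.pyGetD_eq_getElem _ _ ha (by omega)]
    have hb2 : bestTmp groups rel = pyIntersection rel (groups.getD bw.2.toNat []) := htmp
    rw [hb2, List.getD_eq_getElem _ _ (by omega)]
    rfl
def intesectA (sr sg : List (List Int)) : List (List Int) :=
  (PySem.List.pyRange 0 (PySem.List.len sr)).foldl (fun intesect i =>
    let tmp : List Int := sg.foldl (fun tmp g =>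
      if PySem.List.len tmp < PySem.List.len (pyIntersection (PySem.List.pyGetD sr i []) g)
      then pyIntersection (PySem.List.pyGetD sr i []) g
      else tmp) []
    intesect ++ [tmp]) []

theorem intesectA_eq (sr sg : List (List Int)) : intesectA sr sg = sr.map (bestTmp sg) := by
  show List.foldl (fun acc j => acc ++ [bestTmp sg (PySem.List.pyGetD sr j [])]) []
    (PySem.List.pyRange 0 (PySem.List.len sr)) = _
  rw [PySem.List.foldl_pyRange_zero_pyGetD sr [] (fun acc rel => acc ++ [bestTmp sg rel]) []]
  rw [PySem.List.foldl_append_singleton_eq_map]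
  simp

theorem missed_eq (sg I : List (List Int)) :
    computeMissedLinks sg I
    = sg.map (fun g => if maxLen g I > 1 then PySem.List.len g - maxLen g I - 1
                       else PySem.List.len g - maxLen g I) := by
  have hpaired : sg.foldl (fun paired g =>
      let tmpMax : Int := (PySem.List.pyRange 0 (PySem.List.len I)).foldl (fun tmpMax i =>
        if tmpMax < PySem.List.len (pyIntersection g (PySem.List.pyGetD I i []))
        then PySem.List.len (pyIntersection g (PySem.List.pyGetD I i []))
        else tmpMax) 0
      paired ++ [tmpMax]) [] = sg.map (fun g => maxLen g I) := by
    have hinner : ∀ g : List Int,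
        (PySem.List.pyRange 0 (PySem.List.len I)).foldl (fun tmpMax i =>
          if tmpMax < PySem.List.len (pyIntersection g (PySem.List.pyGetD I i []))
          then PySem.List.len (pyIntersection g (PySem.List.pyGetD I i []))
          else tmpMax) 0 = maxLen g I := by
      intro g
      show List.foldl (fun acc j =>
        (fun (a : Int) (it : List Int) =>
          if a < PySem.List.len (pyIntersection g it) then PySem.List.len (pyIntersection g it) else a)
        acc (PySem.List.pyGetD I j [])) 0 (PySem.List.pyRange 0 (PySem.List.len I)) = _
      rw [PySem.List.foldl_pyRange_zero_pyGetD I []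
        (fun a it => if a < PySem.List.len (pyIntersection g it) then PySem.List.len (pyIntersection g it) else a) 0]
      rfl
    calc sg.foldl _ [] = sg.foldl (fun paired g => paired ++ [maxLen g I]) [] := by
          apply PySem.List.foldl_congr_mem
          intro acc g _
          simp only [hinner]
        _ = sg.map (fun g => maxLen g I) := by
          rw [PySem.List.foldl_append_singleton_eq_map]; simp
  show (PySem.List.pyRange 0 (PySem.List.len (sg.foldl _ []))).map _ = _
  rw [hpaired]
  exact map_range_pair sg (fun g => maxLen g I)
    (fun g m => if m > 1 then PySem.List.len g - m - 1 else PySem.List.len g - m) [] 0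

theorem A_norm (sr sg : List (List Int)) : countStastics sr sg = normForm sr sg := by
  have h0 : countStastics sr sg =
      (intesectA sr sg,
       ((intesectA sr sg).map (fun p =>
          if PySem.List.len p > 1 then PySem.List.len p - 1 else PySem.List.len p)).sum,
       ((PySem.List.pyRange 0 (PySem.List.len (intesectA sr sg))).map (fun p =>
          if PySem.List.len (PySem.List.pyGetD sr p []) > PySem.List.len (PySem.List.pyGetD (intesectA sr sg) p [])
          then PySem.List.len (PySem.List.pyGetD sr p []) - PySem.List.len (PySem.List.pyGetD (intesectA sr sg) p []) - 1
          else PySem.List.len (PySem.List.pyGetD sr p []) - PySem.List.len (PySem.List.pyGetD (intesectA sr sg) p []))).sum,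
       (computeMissedLinks sg (intesectA sr sg)).sum) := rfl
  rw [h0, intesectA_eq, missed_eq]
  rw [map_range_pair sr (bestTmp sg)
    (fun rel p => if PySem.List.len rel > PySem.List.len p
      then PySem.List.len rel - PySem.List.len p - 1
      else PySem.List.len rel - PySem.List.len p) [] []]
  rfl
def accB (sr sg : List (List Int)) : List (List Int) × Int × Int :=
  sr.foldl (fun acc rel =>
    let t := tallyOf (invertIndex sg) rel
    let bw : Int × Int := (PySem.List.pyRange 0 (PySem.List.len sg)).foldl (fun bw gi =>
      let c := t.getD gi 0
      if c > bw.1 then (c, gi) else bw) (0, -1)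
    let grp : List Int := if bw.2 ≥ 0 then PySem.List.pyGetD sg bw.2 [] else []
    let tmp : List Int := rel.filter (fun v => grp.contains v)
    let k := PySem.List.len tmp
    let n := PySem.List.len rel
    (acc.1 ++ [tmp],
     acc.2.1 + (if k > 1 then k - 1 else k),
     acc.2.2 + (if n > k then n - k - 1 else n - k))) (([] : List (List Int)), (0 : Int), (0 : Int))

theorem accB_eq (sr sg : List (List Int)) :
    accB sr sg = (sr.map (bestTmp sg),
      ((sr.map (bestTmp sg)).map (fun p =>
        if PySem.List.len p > 1 then PySem.List.len p - 1 else PySem.List.len p)).sum,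
      (sr.map (fun rel =>
        if PySem.List.len rel > PySem.List.len (bestTmp sg rel)
        then PySem.List.len rel - PySem.List.len (bestTmp sg rel) - 1
        else PySem.List.len rel - PySem.List.len (bestTmp sg rel))).sum) := by
  have hstep : accB sr sg = sr.foldl (fun acc rel =>
      (acc.1 ++ [bestTmp sg rel],
       acc.2.1 + (if PySem.List.len (bestTmp sg rel) > 1 then PySem.List.len (bestTmp sg rel) - 1
                  else PySem.List.len (bestTmp sg rel)),
       acc.2.2 + (if PySem.List.len rel > PySem.List.len (bestTmp sg rel)
                  then PySem.List.len rel - PySem.List.len (bestTmp sg rel) - 1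
                  else PySem.List.len rel - PySem.List.len (bestTmp sg rel)))) ([], 0, 0) := by
    apply PySem.List.foldl_congr_mem
    intro acc rel _
    have htmp := argmax_eq rel sg (fun gi => (tallyOf (invertIndex sg) rel).getD gi 0)
      (fun k hk => tally_invert sg rel k hk)
    show ((acc.1 ++ [rel.filter (fun v =>
        (if ((PySem.List.pyRange 0 (PySem.List.len sg)).foldl (fun bw gi =>
              if (tallyOf (invertIndex sg) rel).getD gi 0 > bw.1
              then ((tallyOf (invertIndex sg) rel).getD gi 0, gi) else bw) ((0:Int), (-1:Int))).2 ≥ 0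
         then PySem.List.pyGetD sg ((PySem.List.pyRange 0 (PySem.List.len sg)).foldl (fun bw gi =>
              if (tallyOf (invertIndex sg) rel).getD gi 0 > bw.1
              then ((tallyOf (invertIndex sg) rel).getD gi 0, gi) else bw) ((0:Int), (-1:Int))).2 []
         else ([]:List Int)).contains v)], _, _) : List (List Int) × Int × Int) = _
    rw [show (let bw := (PySem.List.pyRange 0 (PySem.List.len sg)).foldl (fun bw gi =>
          if (fun gi => (tallyOf (invertIndex sg) rel).getD gi 0) gi > bw.1
          then ((fun gi => (tallyOf (invertIndex sg) rel).getD gi 0) gi, gi) else bw) ((0:Int), (-1:Int))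
        rel.filter (fun v => (if bw.2 ≥ 0 then PySem.List.pyGetD sg bw.2 [] else ([]:List Int)).contains v))
        = bestTmp sg rel from htmp]
  rw [hstep, foldl_triple]
  simp [Function.comp_def]
theorem missedB_eq (sg I : List (List Int)) :
    sg.foldl (fun missed g =>
      let t := tallyOf (invertIndex I) g
      let m : Int := (PySem.List.pyRange 0 (PySem.List.len I)).foldl (fun m i =>
        let c := t.getD i 0
        if c > m then c else m) 0
      missed + (if m > 1 then PySem.List.len g - m - 1 else PySem.List.len g - m)) 0
    = (sg.map (fun g => if maxLen g I > 1 then PySem.List.len g - maxLen g I - 1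
                        else PySem.List.len g - maxLen g I)).sum := by
  have hinner : ∀ g : List Int,
      (PySem.List.pyRange 0 (PySem.List.len I)).foldl (fun m i =>
        if (tallyOf (invertIndex I) g).getD i 0 > m then (tallyOf (invertIndex I) g).getD i 0 else m) 0
      = maxLen g I := by
    intro g
    have hcongr : (PySem.List.pyRange 0 (PySem.List.len I)).foldl (fun m i =>
        if (tallyOf (invertIndex I) g).getD i 0 > m then (tallyOf (invertIndex I) g).getD i 0 else m) 0
        = (PySem.List.pyRange 0 (PySem.List.len I)).foldl (fun m i =>
        if m < PySem.List.len (pyIntersection g (PySem.List.pyGetD I i []))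
        then PySem.List.len (pyIntersection g (PySem.List.pyGetD I i [])) else m) 0 := by
      apply PySem.List.foldl_congr_mem
      intro m i hi
      rw [PySem.List.len_eq, PySem.List.mem_pyRange_one] at hi
      have hnat : i = ((i.toNat : Nat) : Int) := by omega
      have hlt : i.toNat < I.length := by omega
      rw [hnat, tally_invert I g i.toNat hlt, PySem.List.pyGetD_natCast,
        List.getD_eq_getElem _ _ hlt]
    rw [hcongr]
    show List.foldl (fun acc j =>
      (fun (a : Int) (it : List Int) =>
        if a < PySem.List.len (pyIntersection g it) then PySem.List.len (pyIntersection g it) else a)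
      acc (PySem.List.pyGetD I j [])) 0 (PySem.List.pyRange 0 (PySem.List.len I)) = _
    rw [PySem.List.foldl_pyRange_zero_pyGetD I []
      (fun a it => if a < PySem.List.len (pyIntersection g it) then PySem.List.len (pyIntersection g it) else a) 0]
    rfl
  have houter : sg.foldl (fun missed g =>
      let t := tallyOf (invertIndex I) g
      let m : Int := (PySem.List.pyRange 0 (PySem.List.len I)).foldl (fun m i =>
        let c := t.getD i 0
        if c > m then c else m) 0
      missed + (if m > 1 then PySem.List.len g - m - 1 else PySem.List.len g - m)) 0
      = sg.foldl (fun missed g =>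
        missed + (if maxLen g I > 1 then PySem.List.len g - maxLen g I - 1
                  else PySem.List.len g - maxLen g I)) 0 := by
    apply PySem.List.foldl_congr_mem
    intro missed g _
    simp only [hinner]
  rw [houter, PySem.List.foldl_add]
  simp

theorem B_norm (sr sg : List (List Int)) : countStastics_alt sr sg = normForm sr sg := by
  have h0 : countStastics_alt sr sg =
      ((accB sr sg).1, (accB sr sg).2.1, (accB sr sg).2.2,
       sg.foldl (fun missed g =>
         let t := tallyOf (invertIndex (accB sr sg).1) g
         let m : Int := (PySem.List.pyRange 0 (PySem.List.len (accB sr sg).1)).foldl (fun m i =>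
           let c := t.getD i 0
           if c > m then c else m) 0
         missed + (if m > 1 then PySem.List.len g - m - 1 else PySem.List.len g - m)) 0) := rfl
  rw [h0, accB_eq]
  rw [missedB_eq sg (sr.map (bestTmp sg))]
  rfl

theorem AB_eq (sr sg : List (List Int)) : countStastics sr sg = countStastics_alt sr sg := by
  rw [A_norm, B_norm]

-- ===== VERDICT (by name: the statement is the Claim_ definition above) =====
theorem countStastics_spec : Claim_equal_countStastics := by
  intro sr sg _
  show countStastics sr sg = countStastics_alt sr sg
  exact AB_eq sr sg
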